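-- pv_equiv track=rewrite | github.com/Jiacheeng-Li/Constraint_Graph_Pipeline | src/step3_global_constraints.py | _has_intro_body_conclusion
-- ===== SOURCE A (Python) =====
-- from typing import List, Dict, Any
--
-- def _has_intro_body_conclusion(segmentation: Dict[str, Any]) -> bool:
--     """
--     根据 Step2 的 segmentation 结果，看看是否能观察到典型结构：
--     - 存在开篇类块 (Opening / Intro / Background / Context)
--     - 存在主体分析类块 (Main Analysis / Discussion / Evaluation / Argument)
--     - 存在总结/展望类块 (Conclusion / Summary / Outlook / Recommendation)
--
--     如果这些intent基本存在，就可以生成一个 has_sections 约束。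
--     否则别强行要求。
--     """
--     intents = [blk.get("intent", "").lower() for blk in segmentation.get("blocks", [])]
--
--     def any_contains(keys):
--         return any(any(k in intent for k in keys) for intent in intents)
--
--     has_opening = any_contains(["opening", "intro", "context", "background"])
--     has_body = any_contains(["analysis", "discussion", "main", "argument", "evaluation"])
--     has_conclusion = any_contains(["conclusion", "summary", "outlook", "recommendation"])
--
--     return has_opening and has_body and has_conclusion
-- ===== SOURCE B (Python) =====
-- _OPENING_KEYS = ("opening", "intro", "context", "background")
-- _BODY_KEYS = ("analysis", "discussion", "main", "argument", "evaluation")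
-- _CONCLUSION_KEYS = ("conclusion", "summary", "outlook", "recommendation")
--
--
-- def _has_intro_body_conclusion(segmentation):
--     has_opening = has_body = has_conclusion = False
--     for blk in segmentation.get("blocks", []):
--         intent = blk.get("intent", "").lower()
--         has_opening = has_opening or any(k in intent for k in _OPENING_KEYS)
--         has_body = has_body or any(k in intent for k in _BODY_KEYS)
--         has_conclusion = has_conclusion or any(k in intent for k in _CONCLUSION_KEYS)
--         if has_opening and has_body and has_conclusion:
--             return True
--     return has_opening and has_body and has_conclusion
-- ===== Notes on version B (the rewrite author's own statement) =====
-- stated objective: alternative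
-- what changed: Replaces the materialised intents list plus three separate full any-of-any scans with a single pass over the blocks that maintains three boolean flags and returns early once all three are set.
import Mathlib
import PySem

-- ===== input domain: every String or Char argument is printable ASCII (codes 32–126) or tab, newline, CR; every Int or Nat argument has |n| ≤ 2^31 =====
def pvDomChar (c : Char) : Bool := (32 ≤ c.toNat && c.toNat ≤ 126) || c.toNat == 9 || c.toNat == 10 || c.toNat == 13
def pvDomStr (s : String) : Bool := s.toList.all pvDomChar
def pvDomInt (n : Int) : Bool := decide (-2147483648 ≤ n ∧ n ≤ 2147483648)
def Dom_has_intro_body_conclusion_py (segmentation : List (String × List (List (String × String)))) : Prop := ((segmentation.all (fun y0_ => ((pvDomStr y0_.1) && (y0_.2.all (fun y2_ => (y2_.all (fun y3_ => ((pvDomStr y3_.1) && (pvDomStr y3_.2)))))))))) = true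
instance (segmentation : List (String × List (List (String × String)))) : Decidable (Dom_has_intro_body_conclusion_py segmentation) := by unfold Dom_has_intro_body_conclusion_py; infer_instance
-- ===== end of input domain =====

-- B replaces A's three independent any-of-any scans over a materialised intents list
-- with a single flag-maintaining pass over the blocks with an early exit (objective: alternative).


-- ===== PORT A =====
-- A: intents = [blk.get("intent","").lower() for blk in segmentation.get("blocks",[])];
--    then three separate any-of-any scans, conjoined.
def pvAnyContains (intents : List String) (keys : List String) : Bool :=
  intents.any (fun intent => keys.any (fun k => PySem.Str.isIn k intent))

def has_intro_body_conclusion_py (segmentation : List (String × List (List (String × String)))) : Bool :=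
  let blocks := (PySem.Dict.mk segmentation).getD "blocks" []
  let intents := blocks.map (fun blk => PySem.Str.lower ((PySem.Dict.mk blk).getD "intent" ""))
  let has_opening := pvAnyContains intents ["opening", "intro", "context", "background"]
  let has_body := pvAnyContains intents ["analysis", "discussion", "main", "argument", "evaluation"]
  let has_conclusion := pvAnyContains intents ["conclusion", "summary", "outlook", "recommendation"]
  has_opening && has_body && has_conclusion

-- ===== PORT B =====
-- B: one loop over the blocks maintaining three flags, early return once all are set.
def pvOpeningKeys : List String := ["opening", "intro", "context", "background"]
def pvBodyKeys : List String := ["analysis", "discussion", "main", "argument", "evaluation"]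
def pvConclusionKeys : List String := ["conclusion", "summary", "outlook", "recommendation"]

def pvAltLoop : List (List (String × String)) → Bool → Bool → Bool → Bool
  | [], hasOpening, hasBody, hasConclusion => hasOpening && hasBody && hasConclusion
  | blk :: rest, hasOpening, hasBody, hasConclusion =>
    let intent := PySem.Str.lower ((PySem.Dict.mk blk).getD "intent" "")
    let hasOpening' := hasOpening || pvOpeningKeys.any (fun k => PySem.Str.isIn k intent)
    let hasBody' := hasBody || pvBodyKeys.any (fun k => PySem.Str.isIn k intent)
    let hasConclusion' := hasConclusion || pvConclusionKeys.any (fun k => PySem.Str.isIn k intent)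
    if hasOpening' && hasBody' && hasConclusion' then true
    else pvAltLoop rest hasOpening' hasBody' hasConclusion'

def has_intro_body_conclusion_py_alt (segmentation : List (String × List (List (String × String)))) : Bool :=
  pvAltLoop ((PySem.Dict.mk segmentation).getD "blocks" []) false false false

-- ===== PRECONDITION & SPEC =====
def Spec_has_intro_body_conclusion_py (segmentation : List (String × List (List (String × String)))) (out : Bool) : Prop := out = has_intro_body_conclusion_py_alt segmentation
instance (segmentation : List (String × List (List (String × String)))) (out : Bool) : Decidable (Spec_has_intro_body_conclusion_py segmentation out) := by unfold Spec_has_intro_body_conclusion_py; infer_instance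

-- ===== CLAIM (what is proved, stated in full; the proofs are below) =====
def Claim_equal_has_intro_body_conclusion_py : Prop := ∀ (segmentation : List (String × List (List (String × String)))), Dom_has_intro_body_conclusion_py segmentation → Spec_has_intro_body_conclusion_py segmentation (has_intro_body_conclusion_py segmentation)

-- ===== LEMMAS AND PROOFS =====
-- Per-block predicate: the block's lowered intent contains one of the keys.
def pvHits (keys : List String) (blk : List (String × String)) : Bool :=
  keys.any (fun k => PySem.Str.isIn k (PySem.Str.lower ((PySem.Dict.mk blk).getD "intent" "")))

-- Loop invariant for B: the flag-maintaining pass computes the conjunction of the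
-- three "some block hits" facts, each pre-seeded with the incoming flag.
theorem pvAltLoop_eq (blocks : List (List (String × String))) (o b c : Bool) :
    pvAltLoop blocks o b c =
      ((o || blocks.any (pvHits pvOpeningKeys)) &&
       (b || blocks.any (pvHits pvBodyKeys)) &&
       (c || blocks.any (pvHits pvConclusionKeys))) := by
  induction blocks generalizing o b c with
  | nil => simp [pvAltLoop]
  | cons blk rest ih =>
    simp only [pvAltLoop, List.any_cons]
    split
    next h =>
      simp only [Bool.and_eq_true, Bool.or_eq_true] at h
      obtain ⟨⟨ho, hb⟩, hc⟩ := h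
      rcases ho with ho | ho <;> rcases hb with hb | hb <;> rcases hc with hc | hc <;>
        simp_all [pvHits]
    next =>
      rw [ih]
      simp [pvHits, Bool.or_assoc]

-- A's any-of-any over the mapped intents list is the blockwise any of pvHits.
theorem pvAnyContains_map (blocks : List (List (String × String))) (keys : List String) :
    pvAnyContains (blocks.map (fun blk => PySem.Str.lower ((PySem.Dict.mk blk).getD "intent" ""))) keys
      = blocks.any (pvHits keys) := by
  unfold pvAnyContains pvHits
  rw [List.any_map]
  rfl

-- ===== VERDICT (by name: the statement is the Claim_ definition above) =====
theorem has_intro_body_conclusion_py_spec : Claim_equal_has_intro_body_conclusion_py := by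
  intro segmentation _
  unfold Spec_has_intro_body_conclusion_py has_intro_body_conclusion_py has_intro_body_conclusion_py_alt
  rw [pvAltLoop_eq]
  simp [pvAnyContains_map, pvOpeningKeys, pvBodyKeys, pvConclusionKeys]
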